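-- pv_equiv track=rewrite | github.com/amits0003/LeetCodes | longestCommonPrefix.py | alternate_min_max
-- ===== SOURCE A (Python) =====
-- def alternate_min_max(array):
--     # Sort the array
--     sorted_array = sorted(array)
--
--     # Initialize result array
--     result = []
--
--     # Indices for filling result
--     left, right = 0, len(array) - 1
--
--     # Fill result with alternate min and max values
--     for i in range(len(array)):
--         if i % 2 == 0:
--             result.append(sorted_array[right])
--             right -= 1
--         else:
--             result.append(sorted_array[left])
--             left += 1
--
--     return result
-- ===== SOURCE B (Python) =====
-- def alternate_min_max(array):
--     # Scatter: place each sorted element directly at its closed-form target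
--     # position in a preallocated output (single pass, no alternating loop).
--     s = sorted(array)
--     n = len(s)
--     out = [None] * n
--     for j, v in enumerate(s):
--         if j < n // 2:
--             out[2 * j + 1] = v          # j-th smallest -> odd slot
--         else:
--             out[2 * (n - 1 - j)] = v    # (n-1-j)-th largest -> even slot
--     return out
-- ===== Notes on version B (the rewrite author's own statement) =====
-- stated objective: alternative
-- what changed: B preallocates the output and scatters each sorted element directly into its closed-form destination index (2j+1 for the lower half, 2(n-1-j) for the upper half) in one pass, instead of A's alternating-append loop that walks the sorted array with two converging left/right pointers.
import Mathlib
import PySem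

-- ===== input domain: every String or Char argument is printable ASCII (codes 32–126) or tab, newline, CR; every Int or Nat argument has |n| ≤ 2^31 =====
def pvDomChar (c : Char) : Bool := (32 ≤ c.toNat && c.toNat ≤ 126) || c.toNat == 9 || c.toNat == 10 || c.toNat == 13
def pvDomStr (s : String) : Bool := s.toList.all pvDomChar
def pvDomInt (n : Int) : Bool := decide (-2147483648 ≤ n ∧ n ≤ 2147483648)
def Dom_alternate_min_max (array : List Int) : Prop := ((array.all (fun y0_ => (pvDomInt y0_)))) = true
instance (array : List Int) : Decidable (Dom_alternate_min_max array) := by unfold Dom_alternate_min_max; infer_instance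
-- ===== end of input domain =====

-- B scatters each sorted element directly into its closed-form target slot of a preallocated
-- output instead of A's alternating-append loop with two converging pointers; alternative decomposition, same results.

-- ===== PORT A =====
-- loop body of A's for-loop: state is (result, left, right)
def stepA (sorted_array : List Int) (st : List Int × Int × Int) (i : Int) : List Int × Int × Int :=
  if i % 2 == 0 then
    (st.1 ++ [PySem.List.pyGetD sorted_array st.2.2 0], st.2.1, st.2.2 - 1)
  else
    (st.1 ++ [PySem.List.pyGetD sorted_array st.2.1 0], st.2.1 + 1, st.2.2)

def alternate_min_max (array : List Int) : List Int :=
  let sorted_array := PySem.List.sorted array id false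
  let init : List Int × Int × Int := ([], 0, (array.length : Int) - 1)
  ((PySem.List.pyRange 0 (array.length : Int) 1).foldl (stepA sorted_array) init).1

-- ===== PORT B =====
-- the destination index B computes for the element at sorted position j
def destB (n j : Int) : Int :=
  if j < PySem.Int.floordiv n 2 then 2 * j + 1 else 2 * (n - 1 - j)

-- [None] * n is modelled as a list of zeros: every slot is assigned exactly once
-- (destB is a bijection on [0, n)), so the placeholder never reaches the output;
-- the destination index is provably nonnegative and < n, so .toNat is exact here.
def alternate_min_max_alt (array : List Int) : List Int :=
  let s := PySem.List.sorted array id false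
  let n : Int := s.length
  let out := List.replicate s.length (0 : Int)
  (PySem.List.enumerate s 0).foldl (fun out jv => out.set (destB n jv.1).toNat jv.2) out

-- ===== PRECONDITION & SPEC =====
def Spec_alternate_min_max (array : List Int) (out : List Int) : Prop := out = alternate_min_max_alt array
instance (array : List Int) (out : List Int) : Decidable (Spec_alternate_min_max array out) := by unfold Spec_alternate_min_max; infer_instance

-- ===== CLAIM (what is proved, stated in full; the proofs are below) =====
def Claim_equal_alternate_min_max : Prop := ∀ (array : List Int), Dom_alternate_min_max array → Spec_alternate_min_max array (alternate_min_max array)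

-- ===== LEMMAS AND PROOFS =====

-- the element A's loop appends at step i (with nn = len(array))
def elA (s : List Int) (nn i : Nat) : Int :=
  if i % 2 = 0 then PySem.List.pyGetD s ((nn : Int) - 1 - ((i / 2 : Nat) : Int)) 0
  else PySem.List.pyGetD s (((i / 2 : Nat) : Int)) 0

-- Nat versions of B's destination map and its inverse
def destN (n j : Nat) : Nat := if j < n / 2 then 2 * j + 1 else 2 * (n - 1 - j)
def invN (n i : Nat) : Nat := if i % 2 = 1 then i / 2 else n - 1 - i / 2

theorem invN_lt {n i : Nat} (hi : i < n) : invN n i < n := by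
  unfold invN; split <;> omega

theorem destN_invN {n i : Nat} (hi : i < n) : destN n (invN n i) = i := by
  unfold destN invN; split <;> split <;> omega

theorem invN_destN {n j : Nat} (hj : j < n) : invN n (destN n j) = j := by
  unfold destN invN; split <;> split <;> omega

theorem destB_toNat {n j : Nat} (hj : j < n) :
    (destB (n : Int) (j : Int)).toNat = destN n j := by
  unfold destB destN
  rw [PySem.Int.floordiv_eq_ediv_of_pos (by omega)]
  split <;> split <;> omega

theorem A_inv (s : List Int) (nn : Nat) (k : Nat) :
    (PySem.List.pyRange 0 (k : Int) 1).foldl (stepA s) ([], 0, (nn : Int) - 1)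
      = ((List.range k).map (elA s nn), ((k / 2 : Nat) : Int),
         (nn : Int) - 1 - (((k + 1) / 2 : Nat) : Int)) := by
  induction k with
  | zero => simp [PySem.List.pyRange_one_eq_nil]
  | succ k ih =>
    have h1 : ((k + 1 : Nat) : Int) = (k : Int) + 1 := by push_cast; ring
    rw [h1, PySem.List.pyRange_one_succ_right (by positivity), List.foldl_append, ih]
    simp only [List.foldl_cons, List.foldl_nil, List.range_succ, List.map_append, List.map_cons,
      List.map_nil]
    by_cases hk : k % 2 = 0
    · have hcond : (((k : Int)) % 2 == 0) = true := by simp; omega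
      have e1 : (k + 1) / 2 = k / 2 := by omega
      have e2 : (k + 1 + 1) / 2 = k / 2 + 1 := by omega
      simp only [stepA, hcond, if_pos, e1, e2]
      refine Prod.ext ?_ (Prod.ext ?_ ?_) <;> (simp [elA, hk]; try ring)
    · have hcond : (((k : Int)) % 2 == 0) = false := by simp; omega
      have e1 : (k + 1) / 2 = k / 2 + 1 := by omega
      have e2 : (k + 1 + 1) / 2 = (k + 1) / 2 := by omega
      simp only [stepA, hcond, Bool.false_eq_true, if_false]
      refine Prod.ext ?_ (Prod.ext ?_ ?_) <;> (simp [elA, hk, e1, e2]; try ring)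

-- B's scatter fold, processed from sorted position n-k onwards: position i of the output
-- holds s[invN n i] once its writer has run, and the initial value otherwise.
theorem B_inv (s : List Int) (n : Nat) (hs : s.length = n) :
    ∀ k, k ≤ n → ∀ (init : List Int), init.length = n →
      ∀ i, i < n →
      ((PySem.List.enumerate (s.drop (n - k)) ((n - k : Nat) : Int)).foldl
          (fun out jv => out.set (destB (n : Int) jv.1).toNat jv.2) init)[i]? =
        if n - k ≤ invN n i then s[invN n i]? else init[i]? := by
  intro k
  induction k with
  | zero =>
    intro _ init _ i hi
    rw [Nat.sub_zero, List.drop_eq_nil_of_le (by omega), PySem.List.enumerate_nil,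
      List.foldl_nil, if_neg (by have := invN_lt hi; omega)]
  | succ k ih =>
    intro hk init hinit i hi
    have hm : n - (k + 1) < n := by omega
    have hm' : n - (k + 1) < s.length := by omega
    rw [List.drop_eq_getElem_cons hm', PySem.List.enumerate_cons, List.foldl_cons]
    have hstart : ((n - (k + 1) : Nat) : Int) + 1 = ((n - k : Nat) : Int) := by omega
    have hdrop : n - (k + 1) + 1 = n - k := by omega
    rw [hdrop, hstart]
    set m := n - (k + 1) with hmdef
    have hset : (init.set (destB (n : Int) (m : Int)).toNat s[m]).length = n := by
      rw [List.length_set]; exact hinit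
    rw [ih (by omega) _ hset i hi]
    have hinv_lt : invN n i < n := invN_lt hi
    by_cases hcase : n - k ≤ invN n i
    · rw [if_pos hcase, if_pos (by omega)]
    · rw [if_neg hcase]
      by_cases heq : invN n i = m
      · rw [if_pos (by omega), heq]
        have hd : destN n m = i := by rw [← heq, destN_invN hi]
        rw [destB_toNat hm, hd, List.getElem?_set_self (by omega),
          List.getElem?_eq_getElem (by omega)]
      · rw [if_neg (by omega)]
        rw [destB_toNat hm]
        have hne : destN n m ≠ i := by
          intro h
          exact heq (by rw [← h, invN_destN hm])
        rw [List.getElem?_set_ne hne]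

theorem length_B_fold (n : Int) (l : List (Int × Int)) (init : List Int) :
    (l.foldl (fun out jv => out.set (destB n jv.1).toNat jv.2) init).length = init.length := by
  induction l generalizing init with
  | nil => rfl
  | cons x xs ih => simp [List.foldl_cons, ih, List.length_set]

theorem elA_eq (s : List Int) (n : Nat) (hs : s.length = n) (i : Nat) (hi : i < n) :
    s[invN n i]? = some (elA s n i) := by
  unfold elA invN
  by_cases hp : i % 2 = 0
  · have h1 : (n : Int) - 1 - ((i / 2 : Nat) : Int) = ((n - 1 - i / 2 : Nat) : Int) := by
      omega
    rw [if_pos hp, if_neg (by omega), h1, PySem.List.pyGetD_natCast,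
      List.getD_eq_getElem s 0 (by rw [hs]; omega),
      List.getElem?_eq_getElem (by rw [hs]; omega)]
  · rw [if_neg hp, if_pos (by omega), PySem.List.pyGetD_natCast,
      List.getD_eq_getElem s 0 (by rw [hs]; omega),
      List.getElem?_eq_getElem (by rw [hs]; omega)]

-- ===== VERDICT (by name: the statement is the Claim_ definition above) =====
theorem alternate_min_max_spec : Claim_equal_alternate_min_max := by
  intro array _
  unfold Spec_alternate_min_max alternate_min_max alternate_min_max_alt
  dsimp only
  set s := PySem.List.sorted array id false with hsdef
  have hs : s.length = array.length := PySem.List.length_sorted ..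
  set n := array.length with hn
  rw [A_inv s n n, hs]
  dsimp only
  apply List.ext_getElem?
  intro i
  by_cases hi : i < n
  · rw [List.getElem?_map, List.getElem?_range hi, Option.map_some]
    have hB := B_inv s n hs n (le_refl n) (List.replicate n (0 : Int))
      (List.length_replicate) i hi
    simp only [Nat.sub_self, List.drop_zero, Nat.cast_zero] at hB
    rw [hB, if_pos (Nat.zero_le _), elA_eq s n hs i hi]
  · rw [List.getElem?_eq_none (by simp; omega), List.getElem?_eq_none]
    rw [length_B_fold, List.length_replicate]
    omega
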